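-- pv_equiv track=rewrite | github.com/dhomini-rabelo/Roquet-q | project/Support/code/utils.py | filters
-- ===== SOURCE A (Python) =====
-- def filters(string: str, new_type='strip'):
--     alloweds_new_types = ['strip', 'name', 'only_numbers', 'money_br']
--     if not isinstance(string, str):
--         return string
--     elif new_type == 'strip':
--         return string.strip()
--     elif new_type == 'name':
--         string = string.strip().title()
--         repeated_spaces = []
--         spaces = 0
--         for letter in string:
--             if spaces == 0 and letter == " ":
--                 spaces += 1
--             elif letter != " ":
--                 spaces = 0
--             else:
--                 spaces += 1
--                 repeated_spaces.append(spaces)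
--         organized_repeated_spaces =  sorted(list(set(repeated_spaces)), reverse=True)
--         for number in organized_repeated_spaces:
--             string = string.replace(" "*number, " ")
--         return string
--     elif new_type == 'only_numbers':
--         new_string = ''
--         for letter in string:
--             if letter in list('0123456789'):
--                 new_string += letter
--         return new_string
--     elif new_type == 'money_br':
--         new_string = ''
--         for letter in string:
--             if letter in list('0123456789,'):
--                 new_string += letter
--         return new_string.replace(',', '.')
-- ===== SOURCE B (Python) =====
-- def filters(string: str, new_type='strip'):
--     if not isinstance(string, str):
--         return string
--     elif new_type == 'strip':
--         return string.strip()
--     elif new_type == 'name':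
--         string = string.strip().title()
--         out = []
--         for letter in string:
--             if letter == ' ' and out and out[-1] == ' ':
--                 continue
--             out.append(letter)
--         return ''.join(out)
--     elif new_type == 'only_numbers':
--         return ''.join(c for c in string if c in '0123456789')
--     elif new_type == 'money_br':
--         return ''.join(c for c in string if c in '0123456789,').replace(',', '.')
-- ===== Notes on version B (the rewrite author's own statement) =====
-- stated objective: simpler
-- what changed: Only the title-casing branch changes algorithm: consecutive spaces are collapsed in one linear pass (skip a space when the last emitted character is a space) instead of collecting space-run lengths into a set, sorting it descending and doing one replace pass per run length; the digit-keeping branches become single filtering joins.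
import Mathlib
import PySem

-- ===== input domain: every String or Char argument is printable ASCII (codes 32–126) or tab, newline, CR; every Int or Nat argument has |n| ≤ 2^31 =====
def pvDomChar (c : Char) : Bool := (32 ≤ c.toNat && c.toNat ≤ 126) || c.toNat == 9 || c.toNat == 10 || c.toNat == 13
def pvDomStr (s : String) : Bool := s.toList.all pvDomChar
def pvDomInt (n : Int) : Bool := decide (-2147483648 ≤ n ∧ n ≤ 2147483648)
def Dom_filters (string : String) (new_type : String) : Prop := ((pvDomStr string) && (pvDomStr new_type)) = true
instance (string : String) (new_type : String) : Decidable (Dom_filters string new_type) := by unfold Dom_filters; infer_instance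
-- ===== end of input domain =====

-- B replaces the title-casing branch's run-length-set + sorted multi-pass replace with one
-- linear collapse pass, and the digit-keeping loops with single filters; same return values everywhere.


-- ===== PORT A =====
-- Python str.title(): uppercase a letter after a non-cased char, lowercase otherwise;
-- exact on the ASCII domain, where the cased characters are exactly the ASCII letters.
def pyTitleGo : Bool → List Char → List Char
  | _, [] => []
  | prev, c :: t =>
    if PySem.Chars.isalpha c then
      (if prev then PySem.Chars.lowerChar c else PySem.Chars.upperChar c) :: pyTitleGo true t
    else c :: pyTitleGo false t

def pyTitle (s : String) : String := String.ofList (pyTitleGo false s.toList)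

def pyDigits : List Char := "0123456789".toList          -- list('0123456789')
def pyDigitsComma : List Char := "0123456789,".toList    -- list('0123456789,')

-- alloweds_new_types is assigned but never used in the Python; the isinstance branch
-- never fires for a str argument.  ' '*number is replicate number.toNat (number ≥ 0 here).
def filters (string : String) (new_type : String) : Option String :=
  if new_type == "strip" then some (PySem.Str.strip string)
  else if new_type == "name" then
    let s := pyTitle (PySem.Str.strip string)
    let st := s.toList.foldl (fun (st : Int × List Int) letter =>
        if st.1 == 0 && letter == ' ' then (st.1 + 1, st.2)
        else if letter != ' ' then (0, st.2)
        else (st.1 + 1, st.2 ++ [st.1 + 1])) (0, [])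
    let organized := PySem.List.sorted (PySem.Set.ofList st.2) (fun x => x) true
    some (organized.foldl
      (fun s n => PySem.Str.replace s (String.ofList (List.replicate n.toNat ' ')) " ") s)
  else if new_type == "only_numbers" then
    some (String.ofList (string.toList.foldl
      (fun acc letter => if pyDigits.contains letter then acc ++ [letter] else acc) []))
  else if new_type == "money_br" then
    some (PySem.Str.replace (String.ofList (string.toList.foldl
      (fun acc letter => if pyDigitsComma.contains letter then acc ++ [letter] else acc) [])) "," ".")
  else none

-- ===== PORT B =====
def filters_alt (string : String) (new_type : String) : Option String :=
  if new_type == "strip" then some (PySem.Str.strip string)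
  else if new_type == "name" then
    let s := pyTitle (PySem.Str.strip string)
    some (String.ofList (s.toList.foldl
      (fun out c => if c == ' ' && out.getLast? == some ' ' then out else out ++ [c]) []))
  else if new_type == "only_numbers" then
    some (String.ofList (string.toList.filter (fun c => pyDigits.contains c)))
  else if new_type == "money_br" then
    some (PySem.Str.replace
      (String.ofList (string.toList.filter (fun c => pyDigitsComma.contains c))) "," ".")
  else none

-- ===== PRECONDITION & SPEC =====
def Spec_filters (string : String) (new_type : String) (out : Option String) : Prop := out = filters_alt string new_type
instance (string : String) (new_type : String) (out : Option String) : Decidable (Spec_filters string new_type out) := by unfold Spec_filters; infer_instance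

-- ===== CLAIM (what is proved, stated in full; the proofs are below) =====
def Claim_equal_filters : Prop := ∀ (string : String) (new_type : String), Dom_filters string new_type → Spec_filters string new_type (filters string new_type)

-- ===== LEMMAS AND PROOFS =====

theorem prefix_repl (j k : Nat) (r : List Char) (hr : r.head? ≠ some ' ') :
    (List.replicate j ' ').isPrefixOf (List.replicate k ' ' ++ r) = true ↔ j ≤ k := by
  induction j generalizing k with
  | zero => simp
  | succ j ih =>
    cases k with
    | zero =>
      simp only [List.replicate_zero, List.nil_append, List.replicate_succ]
      cases r with
      | nil => simp [List.isPrefixOf]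
      | cons c t =>
        simp only [List.head?_cons, ne_eq, Option.some.injEq] at hr
        simp [List.isPrefixOf, Ne.symm hr]
    | succ k =>
      simp only [List.replicate_succ, List.cons_append, List.isPrefixOf_cons₂_self]
      rw [ih]; omega

def repN (n : Nat) : List Char → List Char
  | [] => []
  | c :: t =>
    if (List.replicate (n + 2) ' ').isPrefixOf (c :: t) then ' ' :: repN n (t.drop (n + 1))
    else c :: repN n t
termination_by l => l.length
decreasing_by
  all_goals (simp; try omega)

theorem replace_go_eq (n : Nat) : ∀ (fuel : Nat) (l acc : List Char), l.length ≤ fuel →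
    PySem.Chars.replace.go (List.replicate (n + 2) ' ') [' '] fuel l acc = acc.reverse ++ repN n l := by
  intro fuel
  induction fuel with
  | zero =>
    intro l acc h
    have hl : l = [] := List.eq_nil_of_length_eq_zero (Nat.le_zero.mp h)
    subst hl; simp [PySem.Chars.replace.go, repN]
  | succ f ih =>
    intro l acc h
    cases l with
    | nil => simp [PySem.Chars.replace.go, repN]
    | cons c t =>
      rw [PySem.Chars.replace.go, repN]
      by_cases hp : (List.replicate (n + 2) ' ').isPrefixOf (c :: t) = true
      · simp only [hp, if_true, List.length_replicate]
        rw [show List.drop (n + 2) (c :: t) = t.drop (n + 1) by simp [List.drop_succ_cons]]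
        rw [ih _ _ (by simp at h ⊢; omega)]
        simp
      · simp only [hp, if_false, Bool.false_eq_true]
        rw [ih _ _ (by simp at h; omega)]
        simp

theorem replace_eq_repN (n : Nat) (l : List Char) :
    PySem.Chars.replace l (List.replicate (n + 2) ' ') [' '] = repN n l := by
  rw [PySem.Chars.replace]
  rw [if_neg (by simp)]
  simpa using replace_go_eq n l.length l [] le_rfl


theorem head?_dropWhile_ne (l : List Char) : ((l.dropWhile (· == ' ')).head? ≠ some ' ') := by
  have := List.head?_dropWhile_not (· == ' ') l
  intro h; rw [h] at this; simp at this

theorem takeWhile_eq_replicate (l : List Char) :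
    l.takeWhile (· == ' ') = List.replicate (l.takeWhile (· == ' ')).length ' ' := by
  apply List.eq_replicate_of_mem
  intro b hb; have := List.mem_takeWhile_imp hb; simpa using this

theorem decomp (l : List Char) :
    l = [] ∨ (∃ c t, c ≠ ' ' ∧ l = c :: t) ∨
    (∃ k r, r.head? ≠ some ' ' ∧ l = List.replicate (k + 1) ' ' ++ r) := by
  cases l with
  | nil => exact Or.inl rfl
  | cons c t =>
    by_cases hc : c = ' '
    · subst hc
      refine Or.inr (Or.inr ⟨(((' ' :: t).takeWhile (· == ' ')).length - 1), (' ' :: t).dropWhile (· == ' '), head?_dropWhile_ne _, ?_⟩)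
      have hlen : (((' ' :: t).takeWhile (· == ' ')).length - 1) + 1 = ((' ' :: t).takeWhile (· == ' ')).length := by
        simp [List.takeWhile_cons]
      rw [hlen, ← takeWhile_eq_replicate, List.takeWhile_append_dropWhile]
    · exact Or.inr (Or.inl ⟨c, t, hc, rfl⟩)

def maxRun : List Char → Nat
  | [] => 0
  | c :: t =>
    if c = ' ' then max (1 + (t.takeWhile (· == ' ')).length) (maxRun (t.dropWhile (· == ' ')))
    else maxRun t
termination_by l => l.length
decreasing_by
  · have := List.length_dropWhile_le (· == ' ') t; simp; omega
  · simp

theorem tw_run (k : Nat) (r : List Char) (hr : r.head? ≠ some ' ') :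
    (List.replicate k ' ' ++ r).takeWhile (· == ' ') = List.replicate k ' ' ∧
    (List.replicate k ' ' ++ r).dropWhile (· == ' ') = r := by
  induction k with
  | zero =>
    simp only [List.replicate_zero, List.nil_append]
    cases r with
    | nil => simp
    | cons c t =>
      simp only [List.head?_cons, ne_eq, Option.some.injEq] at hr
      simp [List.takeWhile_cons, List.dropWhile_cons, hr]
  | succ k ih =>
    simp [List.replicate_succ, List.takeWhile_cons, List.dropWhile_cons, ih.1, ih.2]

theorem maxRun_cons_ne {c : Char} (t : List Char) (hc : c ≠ ' ') : maxRun (c :: t) = maxRun t := by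
  rw [maxRun, if_neg hc]

theorem maxRun_run (k : Nat) (r : List Char) (hr : r.head? ≠ some ' ') :
    maxRun (List.replicate (k + 1) ' ' ++ r) = max (k + 1) (maxRun r) := by
  rw [show List.replicate (k + 1) ' ' ++ r = ' ' :: (List.replicate k ' ' ++ r) by simp [List.replicate_succ]]
  rw [maxRun, if_pos rfl, (tw_run k r hr).1, (tw_run k r hr).2]
  simp; omega

theorem repN_cons_ne (n : Nat) {c : Char} (t : List Char) (hc : c ≠ ' ') :
    repN n (c :: t) = c :: repN n t := by
  rw [repN, if_neg]
  intro h
  have := (prefix_repl (n+2) 0 (c :: t) (by simpa using hc)).mp (by simpa using h)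
  omega

theorem drop_replicate_append (m : Nat) (r : List Char) :
    (List.replicate m ' ' ++ r).drop m = r := by
  rw [List.drop_append_of_le_length (by simp)]
  simp

theorem repN_run (n k : Nat) (r : List Char) (hr : r.head? ≠ some ' ') (hk : k + 1 ≤ n + 2) :
    repN n (List.replicate (k + 1) ' ' ++ r) =
      (if k + 1 = n + 2 then [' '] else List.replicate (k + 1) ' ') ++ repN n r := by
  induction k with
  | zero =>
    rw [if_neg (by omega)]
    rw [show List.replicate 1 ' ' ++ r = ' ' :: r by simp]
    rw [repN, if_neg]
    · cases r with
      | nil => simp [repN]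
      | cons c t =>
        simp only [List.head?_cons, ne_eq, Option.some.injEq] at hr
        rw [repN_cons_ne n t hr]; simp
    · intro h
      have := (prefix_repl (n+2) 1 r hr).mp (by simpa using h)
      omega
  | succ k ih =>
    by_cases h : k + 2 = n + 2
    · rw [if_pos h]
      rw [show List.replicate (k + 1 + 1) ' ' ++ r = ' ' :: (List.replicate (k + 1) ' ' ++ r) by simp [List.replicate_succ]]
      rw [repN, if_pos]
      · rw [show n + 1 = k + 1 by omega, drop_replicate_append]
        simp
      · apply (prefix_repl (n+2) (k+2) r hr).mpr (by omega)
    · rw [if_neg h]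
      rw [show List.replicate (k + 1 + 1) ' ' ++ r = ' ' :: (List.replicate (k + 1) ' ' ++ r) by simp [List.replicate_succ]]
      rw [repN, if_neg]
      · rw [ih (by omega)]
        rw [if_neg (by omega)]
        simp [List.replicate_succ]
      · intro hp
        have := (prefix_repl (n+2) (k+2) r hr).mp (by simpa using hp)
        omega

theorem repN_head (n : Nat) (r : List Char) (hr : r.head? ≠ some ' ') :
    (repN n r).head? ≠ some ' ' := by
  cases r with
  | nil => simp [repN]
  | cons c t =>
    simp only [List.head?_cons, ne_eq, Option.some.injEq] at hr
    rw [repN_cons_ne n t hr]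
    simpa using hr

def col2 : Bool → List Char → List Char
  | _, [] => []
  | p, c :: t => if c == ' ' && p then col2 p t else c :: col2 (c == ' ') t

theorem col2_cons_ne (p : Bool) {c : Char} (t : List Char) (hc : c ≠ ' ') :
    col2 p (c :: t) = c :: col2 false t := by
  have : (c == ' ') = false := by simpa using hc
  simp [col2, this]

theorem col2_true_eq_false (r : List Char) (hr : r.head? ≠ some ' ') :
    col2 true r = col2 false r := by
  cases r with
  | nil => rfl
  | cons c t =>
    simp only [List.head?_cons, ne_eq, Option.some.injEq] at hr
    rw [col2_cons_ne true t hr, col2_cons_ne false t hr]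

theorem col2_run_true (k : Nat) (r : List Char) :
    col2 true (List.replicate k ' ' ++ r) = col2 true r := by
  induction k with
  | zero => simp
  | succ k ih => simpa [List.replicate_succ, col2] using ih

theorem col2_run_false (k : Nat) (r : List Char) :
    col2 false (List.replicate (k + 1) ' ' ++ r) = ' ' :: col2 true r := by
  rw [show List.replicate (k + 1) ' ' ++ r = ' ' :: (List.replicate k ' ' ++ r) by simp [List.replicate_succ]]
  rw [col2]
  simp [col2_run_true]

theorem col2_id_fuel : ∀ (m : Nat) (l : List Char), l.length ≤ m → maxRun l ≤ 1 → col2 false l = l := by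
  intro m
  induction m with
  | zero =>
    intro l h _
    have : l = [] := List.eq_nil_of_length_eq_zero (Nat.le_zero.mp h)
    subst this; rfl
  | succ m ih =>
    intro l hlen hmr
    rcases decomp l with h | ⟨c, t, hc, h⟩ | ⟨k, r, hr, h⟩
    · subst h; rfl
    · subst h
      rw [col2_cons_ne false t hc, ih t (by simp at hlen; omega) (by rwa [maxRun_cons_ne t hc] at hmr)]
    · subst h
      rw [maxRun_run k r hr] at hmr
      have hk : k = 0 := by omega
      subst hk
      rw [col2_run_false 0 r, col2_true_eq_false r hr,
          ih r (by simp at hlen; omega) (by omega)]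
      simp

theorem repN_maxRun_fuel (n : Nat) : ∀ (m : Nat) (l : List Char), l.length ≤ m →
    maxRun l ≤ n + 2 → maxRun (repN n l) ≤ n + 1 := by
  intro m
  induction m with
  | zero =>
    intro l h _
    have : l = [] := List.eq_nil_of_length_eq_zero (Nat.le_zero.mp h)
    subst this; simp [repN, maxRun]
  | succ m ih =>
    intro l hlen hmr
    rcases decomp l with h | ⟨c, t, hc, h⟩ | ⟨k, r, hr, h⟩
    · subst h; simp [repN, maxRun]
    · subst h
      rw [repN_cons_ne n t hc, maxRun_cons_ne _ hc]
      exact ih t (by simp at hlen; omega) (by rwa [maxRun_cons_ne t hc] at hmr)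
    · subst h
      rw [maxRun_run k r hr] at hmr
      rw [repN_run n k r hr (by omega)]
      have hrr := ih r (by simp at hlen; omega) (by omega)
      have hh := repN_head n r hr
      by_cases he : k + 1 = n + 2
      · rw [if_pos he]
        rw [show ([' '] : List Char) = List.replicate (0 + 1) ' ' by simp]
        rw [maxRun_run 0 (repN n r) hh]
        omega
      · rw [if_neg he, maxRun_run k (repN n r) hh]
        omega

theorem repN_col2_fuel (n : Nat) : ∀ (m : Nat) (l : List Char), l.length ≤ m →
    maxRun l ≤ n + 2 → col2 false (repN n l) = col2 false l := by
  intro m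
  induction m with
  | zero =>
    intro l h _
    have : l = [] := List.eq_nil_of_length_eq_zero (Nat.le_zero.mp h)
    subst this; simp [repN]
  | succ m ih =>
    intro l hlen hmr
    rcases decomp l with h | ⟨c, t, hc, h⟩ | ⟨k, r, hr, h⟩
    · subst h; simp [repN]
    · subst h
      rw [repN_cons_ne n t hc, col2_cons_ne false _ hc, col2_cons_ne false t hc,
          ih t (by simp at hlen; omega) (by rwa [maxRun_cons_ne t hc] at hmr)]
    · subst h
      rw [maxRun_run k r hr] at hmr
      rw [repN_run n k r hr (by omega)]
      have hh := repN_head n r hr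
      have hrec : col2 false (repN n r) = col2 false r :=
        ih r (by simp at hlen; omega) (by omega)
      by_cases he : k + 1 = n + 2
      · rw [if_pos he]
        rw [show (([' '] : List Char) ++ repN n r) = List.replicate (0 + 1) ' ' ++ repN n r by simp]
        rw [col2_run_false 0 (repN n r), col2_run_false k r,
            col2_true_eq_false _ hh, col2_true_eq_false _ hr, hrec]
      · rw [if_neg he]
        rw [col2_run_false k (repN n r), col2_run_false k r,
            col2_true_eq_false _ hh, col2_true_eq_false _ hr, hrec]

def loopA : Int → List Int → List Char → List Int
  | _, reps, [] => reps
  | s, reps, c :: t =>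
    if s == 0 && c == ' ' then loopA (s + 1) reps t
    else if c != ' ' then loopA 0 reps t
    else loopA (s + 1) (reps ++ [s + 1]) t

theorem loopA_run (j : Nat) : ∀ (s : Nat) (reps : List Int) (r : List Char), 1 ≤ s →
    loopA (s : Int) reps (List.replicate j ' ' ++ r) =
      loopA ((s : Int) + j) (reps ++ (List.range j).map (fun i => ((s + 1 + i : Nat) : Int))) r := by
  induction j with
  | zero => intro s reps r _; simp
  | succ j ih =>
    intro s reps r hs
    rw [show List.replicate (j + 1) ' ' ++ r = ' ' :: (List.replicate j ' ' ++ r) by simp [List.replicate_succ]]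
    rw [loopA]
    rw [if_neg (by simp; omega), if_neg (by simp)]
    have hcast : ((s : Int) + 1) = ((s + 1 : Nat) : Int) := by push_cast; ring
    rw [hcast, ih (s + 1) _ r (by omega)]
    congr 1
    · push_cast; ring
    · rw [List.range_succ_eq_map, List.map_cons, List.map_map, List.append_assoc]
      push_cast
      simp
      intro a _
      ring

theorem loopA_mem : ∀ (m : Nat) (l : List Char), l.length ≤ m → ∀ (reps : List Int) (k : Int),
    k ∈ loopA 0 reps l ↔ k ∈ reps ∨ (2 ≤ k ∧ k ≤ (maxRun l : Int)) := by
  intro m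
  induction m with
  | zero =>
    intro l h reps k
    have : l = [] := List.eq_nil_of_length_eq_zero (Nat.le_zero.mp h)
    subst this
    simp [loopA, maxRun]; omega
  | succ m ih =>
    intro l hlen reps k
    rcases decomp l with h | ⟨c, t, hc, h⟩ | ⟨k', r, hr, h⟩
    · subst h; simp [loopA, maxRun]; omega
    · subst h
      rw [loopA, if_neg (by simpa using hc), if_pos (by simpa using hc)]
      rw [ih t (by simp at hlen; omega), maxRun_cons_ne t hc]
    · subst h
      rw [maxRun_run k' r hr]
      rw [show List.replicate (k' + 1) ' ' ++ r = ' ' :: (List.replicate k' ' ' ++ r) by simp [List.replicate_succ]]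
      rw [loopA, if_pos (by simp)]
      rw [show (0 : Int) + 1 = ((1 : Nat) : Int) by simp]
      rw [loopA_run k' 1 reps r le_rfl]
      cases r with
      | nil =>
        rw [loopA]
        simp only [List.mem_append, List.mem_map, List.mem_range, maxRun]
        constructor
        · rintro (h | ⟨i, hi, rfl⟩)
          · exact Or.inl h
          · right; constructor <;> [(push_cast; omega); (push_cast; omega)]
        · rintro (h | ⟨h2, hub⟩)
          · exact Or.inl h
          · right
            refine ⟨(k - 2).toNat, by simp at hub ⊢; omega, by push_cast; omega⟩
      | cons c t =>
        have hc : c ≠ ' ' := by simpa using hr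
        rw [loopA, if_neg (by simp; omega), if_pos (by simpa using hc)]
        rw [ih t (by simp at hlen; omega)]
        rw [maxRun_cons_ne t hc]
        simp only [List.mem_append, List.mem_map, List.mem_range]
        constructor
        · rintro ((h | ⟨i, hi, rfl⟩) | ⟨h2, hub⟩)
          · exact Or.inl h
          · right; constructor <;> [(push_cast; omega); (push_cast; simp; omega)]
          · right; refine ⟨h2, by simp; omega⟩
        · rintro (h | ⟨h2, hub⟩)
          · exact Or.inl (Or.inl h)
          · simp only [Nat.cast_max] at hub
            rcases le_max_iff.mp hub with h1 | h1
            · exact Or.inl (Or.inr ⟨(k - 2).toNat, by push_cast at h1 ⊢; omega, by push_cast; omega⟩)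
            · exact Or.inr ⟨h2, h1⟩

def descFrom : Nat → List Int
  | 0 => [2]
  | j + 1 => ((j : Int) + 3) :: descFrom j

theorem mem_descFrom (j : Nat) (k : Int) : k ∈ descFrom j ↔ 2 ≤ k ∧ k ≤ (j : Int) + 2 := by
  induction j with
  | zero => simp [descFrom]; omega
  | succ j ih => simp [descFrom, ih]; push_cast; omega

theorem pairwise_descFrom (j : Nat) : (descFrom j).Pairwise (fun a b : Int => b < a) := by
  induction j with
  | zero => simp [descFrom]
  | succ j ih =>
    refine List.Pairwise.cons ?_ ih
    intro b hb
    rw [mem_descFrom] at hb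
    omega

theorem foldB_eq_col2 : ∀ (l : List Char) (out : List Char),
    l.foldl (fun out c => if c == ' ' && out.getLast? == some ' ' then out else out ++ [c]) out =
      out ++ col2 (out.getLast? == some ' ') l := by
  intro l
  induction l with
  | nil => intro out; simp [col2]
  | cons c t ih =>
    intro out
    rw [List.foldl_cons]
    by_cases hcond : (c == ' ' && out.getLast? == some ' ') = true
    · rw [if_pos hcond, ih out]
      have hc : c = ' ' := by simp at hcond; exact hcond.1
      have hp : (out.getLast? == some ' ') = true := by simp at hcond ⊢; exact hcond.2
      rw [col2, hc, hp]
      simp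
    · rw [if_neg hcond, ih (out ++ [c])]
      rw [col2, if_neg (by simpa using hcond)]
      simp [List.getLast?_concat]

theorem foldA_eq_loopA : ∀ (l : List Char) (s : Int) (reps : List Int),
    (l.foldl (fun (st : Int × List Int) letter =>
        if st.1 == 0 && letter == ' ' then (st.1 + 1, st.2)
        else if letter != ' ' then (0, st.2)
        else (st.1 + 1, st.2 ++ [st.1 + 1])) (s, reps)).2 = loopA s reps l := by
  intro l
  induction l with
  | nil => intro s reps; simp [loopA]
  | cons c t ih =>
    intro s reps
    rw [List.foldl_cons, loopA]
    by_cases h1 : (s == 0 && c == ' ') = true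
    · rw [if_pos h1, if_pos h1]; exact ih _ _
    · rw [if_neg h1, if_neg h1]
      by_cases h2 : (c != ' ') = true
      · rw [if_pos h2, if_pos h2]; exact ih _ _
      · rw [if_neg h2, if_neg h2]; exact ih _ _

theorem main_fold (j : Nat) : ∀ (l : List Char), maxRun l ≤ j + 2 →
    (descFrom j).foldl (fun cs n => PySem.Chars.replace cs (List.replicate n.toNat ' ') [' ']) l =
      col2 false l := by
  induction j with
  | zero =>
    intro l h
    rw [descFrom]
    rw [List.foldl_cons, List.foldl_nil]
    rw [show ((2 : Int).toNat) = 0 + 2 by rfl]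
    rw [replace_eq_repN 0 l]
    have h1 : maxRun (repN 0 l) ≤ 1 := repN_maxRun_fuel 0 l.length l le_rfl h
    calc repN 0 l = col2 false (repN 0 l) := (col2_id_fuel (repN 0 l).length _ le_rfl h1).symm
      _ = col2 false l := repN_col2_fuel 0 l.length l le_rfl h
  | succ j ih =>
    intro l h
    rw [descFrom, List.foldl_cons]
    rw [show (((j : Int) + 3).toNat) = (j + 1) + 2 by omega]
    rw [replace_eq_repN (j + 1) l]
    rw [ih (repN (j + 1) l) (repN_maxRun_fuel (j + 1) l.length l le_rfl h)]
    exact repN_col2_fuel (j + 1) l.length l le_rfl h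

theorem fold_str_toList (ds : List Int) : ∀ (s : String),
    (ds.foldl (fun s n => PySem.Str.replace s (String.ofList (List.replicate n.toNat ' ')) " ") s).toList =
      ds.foldl (fun cs n => PySem.Chars.replace cs (List.replicate n.toNat ' ') [' ']) s.toList := by
  induction ds with
  | nil => intro s; simp
  | cons d ds ih =>
    intro s
    rw [List.foldl_cons, List.foldl_cons, ih]
    congr 1
    rw [PySem.Str.toList_replace, String.toList_ofList]
    rfl

theorem name_branch (l : List Char) :
    (PySem.List.sorted (PySem.Set.ofList (loopA 0 [] l)) (fun x => x) true).foldl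
        (fun cs n => PySem.Chars.replace cs (List.replicate n.toNat ' ') [' ']) l =
      col2 false l := by
  rcases Nat.lt_or_ge (maxRun l) 2 with hM | hM
  · have hnil : loopA 0 [] l = [] := by
      rw [List.eq_nil_iff_forall_not_mem]
      intro k hk
      rw [loopA_mem l.length l le_rfl] at hk
      rcases hk with h | ⟨h2, hub⟩
      · simp at h
      · omega
    rw [hnil]
    rw [show PySem.List.sorted (PySem.Set.ofList ([] : List Int)) (fun x => x) true = [] from rfl]
    rw [List.foldl_nil]
    exact (col2_id_fuel l.length l le_rfl (by omega)).symm
  · obtain ⟨j, hj⟩ : ∃ j, maxRun l = j + 2 := ⟨maxRun l - 2, by omega⟩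
    have hsorted : PySem.List.sorted (PySem.Set.ofList (loopA 0 [] l)) (fun x => x) true = descFrom j := by
      apply PySem.List.sorted_rev_eq_of_perm_of_pairwise_gt
      · rw [List.perm_ext_iff_of_nodup (pairwise_descFrom j).nodup (PySem.Set.nodup_ofList _)]
        intro a
        rw [mem_descFrom, PySem.Set.mem_ofList, loopA_mem l.length l le_rfl]
        simp [hj]
      · exact pairwise_descFrom j
    rw [hsorted]
    exact main_fold j l (by omega)

-- ===== VERDICT (by name: the statement is the Claim_ definition above) =====
theorem filters_spec : Claim_equal_filters := by
  intro string new_type _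
  show filters string new_type = filters_alt string new_type
  unfold filters filters_alt
  by_cases h1 : (new_type == "strip") = true
  · rw [if_pos h1, if_pos h1]
  · rw [if_neg h1, if_neg h1]
    by_cases h2 : (new_type == "name") = true
    · rw [if_pos h2, if_pos h2]
      refine congrArg some ?_
      apply String.toList_inj.mp
      rw [String.toList_ofList, fold_str_toList]
      rw [foldA_eq_loopA, foldB_eq_col2]
      rw [show (([] : List Char).getLast? == some ' ') = false from rfl]
      simpa using name_branch (pyTitle (PySem.Str.strip string)).toList
    · rw [if_neg h2, if_neg h2]
      by_cases h3 : (new_type == "only_numbers") = true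
      · rw [if_pos h3, if_pos h3]
        refine congrArg some ?_
        apply String.toList_inj.mp
        rw [String.toList_ofList, String.toList_ofList]
        have := PySem.List.foldl_append_if (fun c => pyDigits.contains c) id string.toList []
        simpa using this
      · rw [if_neg h3, if_neg h3]
        by_cases h4 : (new_type == "money_br") = true
        · rw [if_pos h4, if_pos h4]
          refine congrArg some ?_
          refine congrArg (fun t => PySem.Str.replace t "," ".") ?_
          apply String.toList_inj.mp
          rw [String.toList_ofList, String.toList_ofList]
          have := PySem.List.foldl_append_if (fun c => pyDigitsComma.contains c) id string.toList []
          simpa using this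
        · rw [if_neg h4, if_neg h4]
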